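-- pv_equiv track=rewrite | github.com/career-prep/ucp-namer-latam-2026 | aungnanda_oo/q11_VacationDestinations.py | vacationDestinations
-- ===== SOURCE A (Python) =====
-- import heapq
--
-- def vacationDestinations(connections, origin, k):
--     graph = {}
--     for a, b, time in connections:
--         graph.setdefault(a, []).append((b, time))
--         graph.setdefault(b, []).append((a, time))
--
--     dist = {origin: 0}
--     heap = [(0, origin)]
--
--     while heap:
--         time, city = heapq.heappop(heap)
--         if time > dist.get(city, float("inf")):
--             continue
--         # Leaving an intermediate city costs +1 hr stopover; origin has no stopover
--         stopover = 1 if city != origin else 0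
--         for neighbor, travel_time in graph.get(city, []):
--             new_time = time + stopover + travel_time
--             if new_time < dist.get(neighbor, float("inf")):
--                 dist[neighbor] = new_time
--                 heapq.heappush(heap, (new_time, neighbor))
--
--     return sum(1 for city, t in dist.items() if city != origin and t <= k)
-- ===== SOURCE B (Python) =====
-- def vacationDestinations(connections, origin, k):
--     # Bellman-Ford style: uniform edge-relaxation sweeps until stable (no priority queue).
--     edges = []
--     for a, b, t in connections:
--         edges.append((a, b, t))
--         edges.append((b, a, t))
--
--     dist = {origin: 0}
--     changed = True
--     while changed:
--         changed = False
--         for u, v, t in edges: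
--             if u in dist:
--                 nd = dist[u] + (0 if u == origin else 1) + t
--                 if v not in dist or nd < dist[v]:
--                     dist[v] = nd
--                     changed = True
--
--     return sum(1 for city, t in dist.items() if city != origin and t <= k)
-- ===== Notes on version B (the rewrite author's own statement) =====
-- stated objective: alternative
-- what changed: Replaces the heapq-based Dijkstra (pop-min ordering with lazy stale-entry skipping) by a priority-queue-free Bellman-Ford style loop that sweeps uniformly over a precomputed bidirectional edge list, relaxing until a full pass makes no change; the final count over the sparse dist dict is unchanged.
-- outside the precondition, e.g. on vacationDestinations([('x', 'y', -5)], 'o', 10): A returns 0, B returns 0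
import Mathlib
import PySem

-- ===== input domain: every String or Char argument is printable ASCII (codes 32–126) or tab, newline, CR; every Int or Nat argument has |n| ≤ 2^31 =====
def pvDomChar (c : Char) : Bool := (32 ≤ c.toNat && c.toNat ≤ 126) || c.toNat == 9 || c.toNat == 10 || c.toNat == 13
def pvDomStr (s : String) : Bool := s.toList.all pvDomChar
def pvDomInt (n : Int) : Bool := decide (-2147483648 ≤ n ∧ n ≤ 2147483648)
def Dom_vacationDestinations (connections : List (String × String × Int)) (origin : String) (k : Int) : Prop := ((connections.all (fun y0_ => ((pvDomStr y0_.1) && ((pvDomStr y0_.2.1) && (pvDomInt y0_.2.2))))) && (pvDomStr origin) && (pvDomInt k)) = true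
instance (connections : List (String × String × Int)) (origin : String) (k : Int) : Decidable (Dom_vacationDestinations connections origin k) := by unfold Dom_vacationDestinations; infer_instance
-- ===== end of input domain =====

-- B replaces A's heapq Dijkstra by a priority-queue-free Bellman-Ford style 'relax until stable'
-- sweep over a bidirectional edge list (objective: alternative algorithm, similar cost).

-- ===== PORT A =====
-- graph.setdefault(a, []).append((b, time)) ported as insert a (getD a [] ++ [(b, time)])
def pvBuildGraph (connections : List (String × String × Int)) :
    PySem.Dict String (List (String × Int)) :=
  connections.foldl (fun g c =>
    let g1 := g.insert c.1 ((g.getD c.1 []) ++ [(c.2.1, c.2.2)])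
    g1.insert c.2.1 ((g1.getD c.2.1 []) ++ [(c.1, c.2.2)])) PySem.Dict.empty

-- Python tuple order on (time, city), as used by heapq
def pvPairLt (x y : Int × String) : Bool := decide (x.1 < y.1 ∨ (x.1 = y.1 ∧ x.2 < y.2))

-- heapq.heappop: the heap is the multiset of entries; pop extracts a minimal (time, city)
def pvHeapMin (h : Int × String) (rest : List (Int × String)) : Int × String :=
  rest.foldl (fun m x => if pvPairLt x m then x else m) h

-- termination measure components (totality device only; Python's loop state is (dist, heap))
def pvVerts (connections : List (String × String × Int)) (origin : String) : List String :=
  origin :: connections.flatMap (fun c => [c.1, c.2.1])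

def pvMissing (verts : List String) (dist : PySem.Dict String Int) : Nat :=
  (verts.filter (fun v => !(dist.contains v))).length

def pvPot (dist : PySem.Dict String Int) : Nat :=
  (dist.keys.map (fun v => (dist.getD v 0).toNat)).sum

def pvLexLt3 (a b : Nat × Nat × Nat) : Bool :=
  a.1 < b.1 || (a.1 == b.1 && (a.2.1 < b.2.1 || (a.2.1 == b.2.1 && a.2.2 < b.2.2)))

-- the inner 'for neighbor, travel_time in graph.get(city, [])' relaxation loop
def pvRelaxA (time stopover : Int) (nbrs : List (String × Int))
    (st : PySem.Dict String Int × List (Int × String)) :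
    PySem.Dict String Int × List (Int × String) :=
  nbrs.foldl (fun st nb =>
    let newTime := time + stopover + nb.2
    match st.1.get? nb.1 with
    | none => (st.1.insert nb.1 newTime, st.2 ++ [(newTime, nb.1)])
    | some d => if newTime < d then (st.1.insert nb.1 newTime, st.2 ++ [(newTime, nb.1)]) else st) st

-- the 'while heap:' loop; the pvLexLt3 guard is a totality device (Python diverges on
-- reachable negative-weight edges; under Pre_ the guard is proved to always hold)
lemma pvHeapMin_mem (x : Int × String) (rest : List (Int × String)) :
    pvHeapMin x rest ∈ x :: rest := by
  have h : ∀ (l : List (Int × String)) (y : Int × String), pvHeapMin y l = y ∨ pvHeapMin y l ∈ l := by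
    intro l
    induction l with
    | nil => intro y; exact Or.inl rfl
    | cons r rs ih =>
      intro y
      have e : pvHeapMin y (r :: rs) = pvHeapMin (if pvPairLt r y then r else y) rs := rfl
      rcases ih (if pvPairLt r y then r else y) with h | h
      · rw [e, h]; split
        · exact Or.inr List.mem_cons_self
        · exact Or.inl rfl
      · exact Or.inr (List.mem_cons_of_mem _ (e ▸ h))
  rcases h rest x with h | h
  · rw [h]; exact List.mem_cons_self
  · exact List.mem_cons_of_mem _ h

def pvLoopA (verts : List String) (graph : PySem.Dict String (List (String × Int)))
    (origin : String) (dist : PySem.Dict String Int) (heap : List (Int × String)) :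
    PySem.Dict String Int :=
  match heap with
  | [] => dist
  | x :: rest =>
    let m := pvHeapMin x rest
    let heap' := (x :: rest).erase m
    let cont : Bool := match dist.get? m.2 with
      | none => false          -- time > float('inf') is never true
      | some d => decide (m.1 > d)
    if cont then pvLoopA verts graph origin dist heap'
    else
      let stopover : Int := if m.2 ≠ origin then 1 else 0
      match pvRelaxA m.1 stopover (graph.getD m.2 []) (dist, heap') with
      | (dist2, heap2) =>
        if pvLexLt3 (pvMissing verts dist2, pvPot dist2, heap2.length)
                    (pvMissing verts dist, pvPot dist, (x :: rest).length) then
          pvLoopA verts graph origin dist2 heap2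
        else dist2
  termination_by (pvMissing verts dist, pvPot dist, heap.length)
  decreasing_by
  · refine Prod.Lex.right _ (Prod.Lex.right _ ?_)
    have hm := pvHeapMin_mem x rest
    rw [List.length_erase_of_mem hm]
    have := List.length_pos_of_mem hm
    omega
  · rename_i hguard
    simp only [pvLexLt3, Bool.or_eq_true, Bool.and_eq_true, decide_eq_true_eq, beq_iff_eq,
      Nat.lt_iff_add_one_le] at hguard
    rcases hguard with h1 | ⟨h1, h2 | ⟨h2, h3⟩⟩
    · exact Prod.Lex.left _ _ (by omega)
    · exact h1 ▸ Prod.Lex.right _ (Prod.Lex.left _ _ (by omega))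
    · exact h1 ▸ Prod.Lex.right _ (h2 ▸ Prod.Lex.right _ (by omega))

def pvCount (origin : String) (k : Int) (dist : PySem.Dict String Int) : Int :=
  dist.items.foldl (fun acc p => if p.1 ≠ origin ∧ p.2 ≤ k then acc + 1 else acc) 0

def vacationDestinations (connections : List (String × String × Int)) (origin : String) (k : Int) : Int :=
  pvCount origin k
    (pvLoopA (pvVerts connections origin) (pvBuildGraph connections) origin
      (PySem.Dict.empty.insert origin 0) [(0, origin)])

-- ===== PORT B =====
-- the bidirectional edge list built by B's first loop
def pvEdges (connections : List (String × String × Int)) : List (String × String × Int) :=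
  connections.foldl (fun es c => es ++ [(c.1, c.2.1, c.2.2), (c.2.1, c.1, c.2.2)]) []

-- one full relaxation sweep over the edge list, tracking the 'changed' flag
def pvPassB (origin : String) (edges : List (String × String × Int))
    (st : PySem.Dict String Int × Bool) : PySem.Dict String Int × Bool :=
  edges.foldl (fun st e =>
    match st.1.get? e.1 with
    | none => st
    | some du =>
      let nd := du + (if e.1 == origin then 0 else 1) + e.2.2
      match st.1.get? e.2.1 with
      | none => (st.1.insert e.2.1 nd, true)
      | some dv => if nd < dv then (st.1.insert e.2.1 nd, true) else st) st

def pvLexLt2 (a b : Nat × Nat) : Bool := a.1 < b.1 || (a.1 == b.1 && a.2 < b.2)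

-- the 'while changed:' loop; the pvLexLt2 guard is a totality device (B's Python, like A,
-- diverges on reachable negative-weight edges; under Pre_ the guard is proved to hold)
def pvLoopB (verts : List String) (origin : String) (edges : List (String × String × Int))
    (dist : PySem.Dict String Int) : PySem.Dict String Int :=
  let st := pvPassB origin edges (dist, false)
  if st.2 then
    if pvLexLt2 (pvMissing verts st.1, pvPot st.1) (pvMissing verts dist, pvPot dist) then
      pvLoopB verts origin edges st.1
    else st.1
  else st.1
  termination_by (pvMissing verts dist, pvPot dist)
  decreasing_by
  rename_i hguard
  simp only [pvLexLt2, Bool.or_eq_true, Bool.and_eq_true, decide_eq_true_eq, beq_iff_eq] at hguard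
  rcases hguard with h1 | ⟨h1, h2⟩
  · exact Prod.Lex.left _ _ h1
  · exact h1 ▸ Prod.Lex.right _ h2

def vacationDestinations_alt (connections : List (String × String × Int)) (origin : String) (k : Int) : Int :=
  pvCount origin k
    (pvLoopB (pvVerts connections origin) origin (pvEdges connections)
      (PySem.Dict.empty.insert origin 0))

-- ===== PRECONDITION & SPEC =====
-- Pre_ excludes negative travel times: on a negative-weight edge reachable from the origin both
-- Pythons loop forever; reachability is not a closed-form input condition, so all negative
-- weights are excluded (on unreachable ones A returns and B agrees; see the cite).
def Pre_vacationDestinations (connections : List (String × String × Int)) (origin : String) (k : Int) : Prop :=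
  ∀ c ∈ connections, 0 ≤ c.2.2
instance (connections : List (String × String × Int)) (origin : String) (k : Int) : Decidable (Pre_vacationDestinations connections origin k) := by unfold Pre_vacationDestinations; infer_instance

def pvWitness_vacationDestinations : (List (String × String × Int)) × String × Int :=
  ([("a", "b", 2), ("b", "c", 3)], "a", 6)

def Spec_vacationDestinations (connections : List (String × String × Int)) (origin : String) (k : Int) (out : Int) : Prop := out = vacationDestinations_alt connections origin k
instance (connections : List (String × String × Int)) (origin : String) (k : Int) (out : Int) : Decidable (Spec_vacationDestinations connections origin k out) := by unfold Spec_vacationDestinations; infer_instance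

-- ===== CLAIM (what is proved, stated in full; the proofs are below) =====
def Claim_equal_vacationDestinations : Prop := ∀ (connections : List (String × String × Int)) (origin : String) (k : Int), Dom_vacationDestinations connections origin k → Pre_vacationDestinations connections origin k → Spec_vacationDestinations connections origin k (vacationDestinations connections origin k)

-- ===== LEMMAS AND PROOFS =====

-- proof-side vocabulary
def pvStop (origin u : String) : Int := if u = origin then 0 else 1

def pvIsEdge (conns : List (String × String × Int)) (u v : String) (c : Int) : Prop :=
  (u, v, c) ∈ conns ∨ (v, u, c) ∈ conns

def pvFeasible (conns : List (String × String × Int)) (origin : String)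
    (f : String → WithTop ℤ) : Prop :=
  f origin ≤ 0 ∧ ∀ u v c, pvIsEdge conns u v c → f v ≤ f u + ((pvStop origin u + c : ℤ) : WithTop ℤ)

-- the common characterization: least fixpoint of the relaxation operator
def pvGood (conns : List (String × String × Int)) (origin : String)
    (D : PySem.Dict String Int) : Prop :=
  D.get? origin = some 0 ∧ D.keys.Nodup ∧
  (∀ u du v c, D.get? u = some du → pvIsEdge conns u v c →
      ∃ dv, D.get? v = some dv ∧ dv ≤ du + pvStop origin u + c) ∧
  (∀ f, pvFeasible conns origin f → ∀ v d, D.get? v = some d → f v ≤ ((d : ℤ) : WithTop ℤ))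

lemma pvStop_nonneg (origin u : String) : 0 ≤ pvStop origin u := by
  unfold pvStop; split <;> omega

lemma pvIsEdge_nonneg {conns : List (String × String × Int)} {u v : String} {c : Int}
    (hPre : ∀ e ∈ conns, 0 ≤ e.2.2) (h : pvIsEdge conns u v c) : 0 ≤ c := by
  rcases h with h | h
  · exact hPre _ h
  · exact hPre _ h

lemma pvIsEdge_mem_verts {conns : List (String × String × Int)} {u v : String} {c : Int}
    (origin : String) (h : pvIsEdge conns u v c) : v ∈ pvVerts conns origin := by
  unfold pvVerts
  rcases h with h | h
  · exact List.mem_cons_of_mem _ (List.mem_flatMap.2 ⟨_, h, by simp⟩)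
  · exact List.mem_cons_of_mem _ (List.mem_flatMap.2 ⟨_, h, by simp⟩)

-- ---- graph construction characterization ----
def pvAdj (l : List (String × String × Int)) (u : String) : List (String × Int) :=
  l.flatMap (fun c =>
    (if c.1 = u then [(c.2.1, c.2.2)] else []) ++ (if c.2.1 = u then [(c.1, c.2.2)] else []))

lemma pvBuildGraph_getD (conns : List (String × String × Int)) :
    ∀ (g : PySem.Dict String (List (String × Int))) (u : String),
      ((conns.foldl (fun g c =>
        let g1 := g.insert c.1 ((g.getD c.1 []) ++ [(c.2.1, c.2.2)])
        g1.insert c.2.1 ((g1.getD c.2.1 []) ++ [(c.1, c.2.2)])) g).getD u [])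
      = g.getD u [] ++ pvAdj conns u := by
  induction conns with
  | nil => intro g u; simp [pvAdj]
  | cons c cs ih =>
    intro g u
    obtain ⟨a, b, t⟩ := c
    rw [List.foldl_cons, ih]
    have hadj : pvAdj ((a, b, t) :: cs) u =
        ((if a = u then [(b, t)] else []) ++ (if b = u then [(a, t)] else []))
          ++ pvAdj cs u := by
      simp [pvAdj]
    rw [hadj]
    clear ih hadj
    simp only [PySem.Dict.getD_insert]
    split_ifs <;> subst_vars <;> simp_all [List.append_assoc]

lemma pvMem_adj_iff {l : List (String × String × Int)} {u v : String} {c : Int} :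
    (v, c) ∈ pvAdj l u ↔ pvIsEdge l u v c := by
  unfold pvAdj pvIsEdge
  rw [List.mem_flatMap]
  constructor
  · rintro ⟨⟨a, b, t⟩, he, hm⟩
    rw [List.mem_append] at hm
    rcases hm with hm | hm
    · split at hm
      · simp only [List.mem_singleton, Prod.mk.injEq] at hm
        rcases hm with ⟨rfl, rfl⟩
        left; rename_i h; rw [← h]; exact he
      · simp at hm
    · split at hm
      · simp only [List.mem_singleton, Prod.mk.injEq] at hm
        rcases hm with ⟨rfl, rfl⟩
        right; rename_i h; rw [← h]; exact he
      · simp at hm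
  · rintro (h | h)
    · exact ⟨(u, v, c), h, by simp⟩
    · exact ⟨(v, u, c), h, by simp⟩

lemma pvMem_graph_iff {conns : List (String × String × Int)} {u v : String} {c : Int} :
    (v, c) ∈ (pvBuildGraph conns).getD u [] ↔ pvIsEdge conns u v c := by
  unfold pvBuildGraph
  rw [pvBuildGraph_getD]
  simp [PySem.Dict.getD_empty, pvMem_adj_iff]

-- ---- B's edge list ----
lemma pvEdges_eq (conns : List (String × String × Int)) :
    pvEdges conns = conns.flatMap (fun c => [(c.1, c.2.1, c.2.2), (c.2.1, c.1, c.2.2)]) := by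
  unfold pvEdges
  suffices h : ∀ (init : List (String × String × Int)),
      conns.foldl (fun es c => es ++ [(c.1, c.2.1, c.2.2), (c.2.1, c.1, c.2.2)]) init
        = init ++ conns.flatMap (fun c => [(c.1, c.2.1, c.2.2), (c.2.1, c.1, c.2.2)]) by
    simpa using h []
  induction conns with
  | nil => simp
  | cons c cs ih => intro init; simp [ih, List.append_assoc]

lemma pvMem_edges {conns : List (String × String × Int)} {e : String × String × Int}
    (h : e ∈ pvEdges conns) : pvIsEdge conns e.1 e.2.1 e.2.2 := by
  rw [pvEdges_eq, List.mem_flatMap] at h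
  obtain ⟨c, hc, hm⟩ := h
  simp only [List.mem_cons, List.not_mem_nil, or_false] at hm
  rcases hm with rfl | rfl
  · exact Or.inl hc
  · exact Or.inr hc

lemma pvEdges_of_isEdge {conns : List (String × String × Int)} {u v : String} {c : Int}
    (h : pvIsEdge conns u v c) : (u, v, c) ∈ pvEdges conns := by
  rw [pvEdges_eq, List.mem_flatMap]
  rcases h with h | h
  · exact ⟨_, h, by simp⟩
  · exact ⟨_, h, by simp⟩

-- ---- measure lemmas ----
lemma pvCountP_lt {α : Type} (p q : α → Bool) (l : List α)
    (himp : ∀ a, p a = true → q a = true) (a0 : α) (hmem : a0 ∈ l)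
    (hp : p a0 = false) (hq : q a0 = true) : l.countP p < l.countP q := by
  induction l with
  | nil => simp at hmem
  | cons b bs ih =>
    rw [List.countP_cons, List.countP_cons]
    rcases List.mem_cons.1 hmem with rfl | hmem'
    · have hle : bs.countP p ≤ bs.countP q := List.countP_mono_left (fun a _ ha => himp a ha)
      simp [hp, hq]; omega
    · have h1 := ih hmem'
      have h2 : (if p b = true then 1 else 0) ≤ (if q b = true then 1 else 0) := by
        by_cases hb : p b = true
        · simp [hb, himp b hb]
        · simp [hb]
      omega

lemma pvMissing_eq_countP (verts : List String) (d : PySem.Dict String Int) :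
    pvMissing verts d = verts.countP (fun v => !(d.contains v)) := by
  simp [pvMissing, List.countP_eq_length_filter]

lemma pvMissing_insert_of_contains {verts : List String} {d : PySem.Dict String Int}
    {v : String} {x : Int} (h : d.contains v = true) :
    pvMissing verts (d.insert v x) = pvMissing verts d := by
  unfold pvMissing
  congr 1
  apply List.filter_congr
  intro u _
  by_cases hu : u = v
  · subst hu; simp [h]
  · simp [PySem.Dict.contains_insert, hu]

lemma pvMissing_insert_lt {verts : List String} {d : PySem.Dict String Int}
    {v : String} {x : Int} (hnc : d.contains v = false) (hv : v ∈ verts) :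
    pvMissing verts (d.insert v x) < pvMissing verts d := by
  rw [pvMissing_eq_countP, pvMissing_eq_countP]
  refine pvCountP_lt _ _ _ ?_ v hv ?_ ?_
  · intro a ha
    simp only [Bool.not_eq_true'] at ha ⊢
    rw [PySem.Dict.contains_insert] at ha
    exact (Bool.or_eq_false_iff.1 ha).2
  · simp
  · simp [hnc]

lemma pvSum_map_lt (l : List String) (f g : String → ℕ) (v : String) (hnd : l.Nodup)
    (hv : v ∈ l) (hag : ∀ u ∈ l, u ≠ v → f u = g u) (hlt : f v < g v) :
    (l.map f).sum < (l.map g).sum := by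
  induction l with
  | nil => simp at hv
  | cons b bs ih =>
    rw [List.map_cons, List.map_cons, List.sum_cons, List.sum_cons]
    rcases List.mem_cons.1 hv with rfl | hv'
    · have he : bs.map f = bs.map g := by
        apply List.map_congr_left
        intro u hu
        exact hag u (List.mem_cons_of_mem _ hu) (fun h => (List.nodup_cons.1 hnd).1 (h ▸ hu))
      rw [he]
      exact Nat.add_lt_add_right hlt _
    · have hb : f b = g b := by
        apply hag b List.mem_cons_self
        intro h
        exact (List.nodup_cons.1 hnd).1 (h ▸ hv')
      rw [hb]
      exact Nat.add_lt_add_left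
        (ih (List.nodup_cons.1 hnd).2 hv' (fun u hu hne => hag u (List.mem_cons_of_mem _ hu) hne)) _

lemma pvContains_of_get? {d : PySem.Dict String Int} {v : String} {dv : Int}
    (h : d.get? v = some dv) : d.contains v = true := by
  rw [PySem.Dict.contains_eq_isSome_get?, h]; rfl

lemma pvPot_insert_lt {d : PySem.Dict String Int} {v : String} {dv x : Int}
    (hnd : d.keys.Nodup) (hv : d.get? v = some dv) (hx0 : 0 ≤ x) (hxlt : x < dv) :
    pvPot (d.insert v x) < pvPot d := by
  have hc : d.contains v = true := pvContains_of_get? hv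
  unfold pvPot
  rw [PySem.Dict.keys_insert_of_contains d x hc]
  apply pvSum_map_lt _ _ _ v hnd ((PySem.Dict.contains_iff_mem_keys _ _).1 hc)
  · intro u _ hne
    rw [PySem.Dict.getD_insert, if_neg hne]
  · rw [PySem.Dict.getD_insert, if_pos rfl, PySem.Dict.getD_of_get?_eq_some d 0 hv]
    omega

def pvMLt (verts : List String) (d' d : PySem.Dict String Int) : Prop :=
  pvMissing verts d' < pvMissing verts d ∨
    (pvMissing verts d' = pvMissing verts d ∧ pvPot d' < pvPot d)

lemma pvMLt_trans {verts : List String} {d1 d2 d3 : PySem.Dict String Int}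
    (h32 : pvMLt verts d3 d2) (h21 : pvMLt verts d2 d1) : pvMLt verts d3 d1 := by
  rcases h32 with h | ⟨he, hp⟩ <;> rcases h21 with h' | ⟨he', hp'⟩
  · exact Or.inl (lt_trans h h')
  · exact Or.inl (he' ▸ h)
  · exact Or.inl (he ▸ h')
  · exact Or.inr ⟨he.trans he', lt_trans hp hp'⟩

-- ---- the loop invariants ----
def pvInvBase (conns : List (String × String × Int)) (origin : String)
    (d : PySem.Dict String Int) : Prop :=
  d.get? origin = some 0 ∧ d.keys.Nodup ∧
  (∀ v dv, d.get? v = some dv → 0 ≤ dv) ∧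
  (∀ f, pvFeasible conns origin f → ∀ v dv, d.get? v = some dv → f v ≤ ((dv : ℤ) : WithTop ℤ))

def pvRelaxedAll (conns : List (String × String × Int)) (origin : String)
    (d : PySem.Dict String Int) (u : String) (du : Int) : Prop :=
  ∀ v c, pvIsEdge conns u v c → ∃ dv, d.get? v = some dv ∧ dv ≤ du + pvStop origin u + c

def pvHeapInv (d : PySem.Dict String Int) (h : List (Int × String)) : Prop :=
  ∀ te ∈ h, ∃ dv, d.get? te.2 = some dv ∧ dv ≤ te.1

-- one successful relaxation d[v] := d[u] + stop(u) + c preserves the base invariant,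
-- strictly decreases the (missing, potential) measure, and only shrinks values
lemma pvRelaxInsert {conns : List (String × String × Int)} {origin : String}
    {d : PySem.Dict String Int} {u v : String} {c du x : Int}
    (hPre : ∀ e ∈ conns, 0 ≤ e.2.2)
    (hedge : pvIsEdge conns u v c)
    (hinv : pvInvBase conns origin d)
    (hdu : d.get? u = some du)
    (hx : x = du + pvStop origin u + c)
    (hbr : d.get? v = none ∨ ∃ dv, d.get? v = some dv ∧ x < dv) :
    pvInvBase conns origin (d.insert v x) ∧
    pvMLt (pvVerts conns origin) (d.insert v x) d ∧
    (∀ w dw, d.get? w = some dw → ∃ dw', (d.insert v x).get? w = some dw' ∧ dw' ≤ dw) ∧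
    (d.insert v x).get? v = some x ∧ 0 ≤ x := by
  obtain ⟨hC1, hC2, hC3, hC4⟩ := hinv
  have hc0 : 0 ≤ c := pvIsEdge_nonneg hPre hedge
  have hx0 : 0 ≤ x := by
    have := hC3 u du hdu
    have := pvStop_nonneg origin u
    omega
  have hvo : v ≠ origin := by
    intro h
    subst h
    rcases hbr with hbrn | ⟨dv, hdv, hlt⟩
    · rw [hC1] at hbrn; simp at hbrn
    · rw [hC1] at hdv
      have : dv = 0 := by injection hdv with h; omega
      omega
  refine ⟨⟨?_, ?_, ?_, ?_⟩, ?_, ?_, PySem.Dict.get?_insert_self _ _ _, hx0⟩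
  · rw [PySem.Dict.get?_insert_of_ne d x (fun h => hvo h.symm), hC1]
  · exact PySem.Dict.nodup_keys_insert _ _ _ hC2
  · intro w dw h
    rw [PySem.Dict.get?_insert] at h
    split at h
    · injection h with h; omega
    · exact hC3 w dw h
  · intro f hf w dw h
    rw [PySem.Dict.get?_insert] at h
    split at h
    · rename_i hwv
      subst hwv
      have h1 : f u ≤ ((du : ℤ) : WithTop ℤ) := hC4 f hf u du hdu
      have h2 : f w ≤ f u + ((pvStop origin u + c : ℤ) : WithTop ℤ) := hf.2 u w c hedge
      have h3 : f w ≤ ((du : ℤ) : WithTop ℤ) + ((pvStop origin u + c : ℤ) : WithTop ℤ) :=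
        le_trans h2 (add_le_add h1 (le_refl _))
      injection h with h
      subst h
      rw [hx]
      calc f w ≤ ((du : ℤ) : WithTop ℤ) + ((pvStop origin u + c : ℤ) : WithTop ℤ) := h3
        _ = ((du + (pvStop origin u + c) : ℤ) : WithTop ℤ) := by
            rw [← WithTop.coe_add]
        _ = ((du + pvStop origin u + c : ℤ) : WithTop ℤ) := by ring_nf
    · exact hC4 f hf w dw h
  · rcases hbr with hbrn | ⟨dv, hdv, hlt⟩
    · exact Or.inl (pvMissing_insert_lt
        (by rw [PySem.Dict.contains_eq_isSome_get?, hbrn]; rfl)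
        (pvIsEdge_mem_verts origin hedge))
    · exact Or.inr ⟨pvMissing_insert_of_contains (pvContains_of_get? hdv),
        pvPot_insert_lt hC2 hdv hx0 hlt⟩
  · intro w dw h
    rw [PySem.Dict.get?_insert]
    split
    · rename_i hwv
      subst hwv
      rcases hbr with hbrn | ⟨dv, hdv, hlt⟩
      · rw [hbrn] at h; simp at h
      · rw [hdv] at h
        injection h with h
        exact ⟨x, rfl, by omega⟩
    · exact ⟨dw, h, le_refl _⟩

-- ---- A side: the inner relaxation fold ----
def pvPostA (conns : List (String × String × Int)) (origin city : String) (t : Int)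
    (nbrs : List (String × Int)) (d : PySem.Dict String Int) (h : List (Int × String))
    (st : PySem.Dict String Int × List (Int × String)) : Prop :=
  pvInvBase conns origin st.1 ∧
  st.1.get? city = some t ∧
  pvHeapInv st.1 st.2 ∧
  (∀ u du, st.1.get? u = some du →
      u = city ∨ pvRelaxedAll conns origin st.1 u du ∨ (du, u) ∈ st.2) ∧
  (∀ p ∈ nbrs, ∃ dv, st.1.get? p.1 = some dv ∧ dv ≤ t + pvStop origin city + p.2) ∧
  (∀ w dw, d.get? w = some dw → ∃ dw', st.1.get? w = some dw' ∧ dw' ≤ dw) ∧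
  ((st.1 = d ∧ st.2 = h) ∨ pvMLt (pvVerts conns origin) st.1 d)

lemma pvRelaxedAll_mono {conns : List (String × String × Int)} {origin : String}
    {d d' : PySem.Dict String Int} {u : String} {du : Int}
    (hmono : ∀ w dw, d.get? w = some dw → ∃ dw', d'.get? w = some dw' ∧ dw' ≤ dw)
    (h : pvRelaxedAll conns origin d u du) : pvRelaxedAll conns origin d' u du := by
  intro v c hedge
  obtain ⟨dv, hdv, hle⟩ := h v c hedge
  obtain ⟨dv', hdv', hle'⟩ := hmono v dv hdv
  exact ⟨dv', hdv', by omega⟩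

lemma pvRelaxA_fold {conns : List (String × String × Int)} {origin city : String} {t : Int}
    (hPre : ∀ e ∈ conns, 0 ≤ e.2.2) :
    ∀ (nbrs : List (String × Int)) (d : PySem.Dict String Int) (h : List (Int × String)),
    (∀ p ∈ nbrs, pvIsEdge conns city p.1 p.2) →
    pvInvBase conns origin d →
    d.get? city = some t →
    pvHeapInv d h →
    (∀ u du, d.get? u = some du →
        u = city ∨ pvRelaxedAll conns origin d u du ∨ (du, u) ∈ h) →
    pvPostA conns origin city t nbrs d h
      (pvRelaxA t (if city ≠ origin then 1 else 0) nbrs (d, h)) := by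
  have hs : (if city ≠ origin then (1 : Int) else 0) = pvStop origin city := by
    unfold pvStop; by_cases hco : city = origin <;> simp [hco]
  intro nbrs
  induction nbrs with
  | nil =>
    intro d h _ hinv hcity hheap hI4
    refine ⟨hinv, hcity, hheap, hI4, by simp, fun w dw hw => ⟨dw, hw, le_refl _⟩, Or.inl ⟨rfl, rfl⟩⟩
  | cons nb rest ih =>
    intro d h hnbrs hinv hcity hheap hI4
    have hedge : pvIsEdge conns city nb.1 nb.2 := hnbrs nb List.mem_cons_self
    have hc0 : 0 ≤ nb.2 := pvIsEdge_nonneg hPre hedge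
    have ht0 : 0 ≤ t := hinv.2.2.1 city t hcity
    set X : Int := t + (if city ≠ origin then (1 : Int) else 0) + nb.2 with hX
    have hXs : X = t + pvStop origin city + nb.2 := by rw [hX, hs]
    rcases hget : d.get? nb.1 with _ | dvv
    -- CASE 1: neighbor absent: insert and push
    · have hred : pvRelaxA t (if city ≠ origin then (1 : Int) else 0) (nb :: rest) (d, h)
          = pvRelaxA t (if city ≠ origin then (1 : Int) else 0) rest
              (d.insert nb.1 X, h ++ [(X, nb.1)]) := by
        unfold pvRelaxA
        rw [List.foldl_cons]
        simp only [hget]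
        rfl
      rw [hred]
      have hstep := pvRelaxInsert (x := X) hPre hedge hinv hcity (by rw [hXs]) (Or.inl hget)
      obtain ⟨hinv', hmlt, hmono, hgetv, hx0⟩ := hstep
      have hne : city ≠ nb.1 := by
        intro hcn; rw [← hcn, hcity] at hget; simp at hget
      have hcity' : (d.insert nb.1 X).get? city = some t := by
        rw [PySem.Dict.get?_insert_of_ne _ _ hne, hcity]
      have hheap' : pvHeapInv (d.insert nb.1 X) (h ++ [(X, nb.1)]) := by
        intro te hte
        rcases List.mem_append.1 hte with hte | hte
        · obtain ⟨dv, hdv, hle⟩ := hheap te hte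
          obtain ⟨dv', hdv', hle'⟩ := hmono te.2 dv hdv
          exact ⟨dv', hdv', by omega⟩
        · simp only [List.mem_singleton] at hte
          subst hte
          exact ⟨X, hgetv, le_refl _⟩
      have hI4' : ∀ u du, (d.insert nb.1 X).get? u = some du →
          u = city ∨ pvRelaxedAll conns origin (d.insert nb.1 X) u du ∨
            (du, u) ∈ h ++ [(X, nb.1)] := by
        intro u du hu
        by_cases huv : u = nb.1
        · subst huv
          rw [hgetv] at hu
          injection hu with hu
          subst hu
          exact Or.inr (Or.inr (by simp))
        · rw [PySem.Dict.get?_insert_of_ne _ _ huv] at hu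
          rcases hI4 u du hu with hh | hh | hh
          · exact Or.inl hh
          · exact Or.inr (Or.inl (pvRelaxedAll_mono hmono hh))
          · exact Or.inr (Or.inr (List.mem_append.2 (Or.inl hh)))
      obtain ⟨P1, P2, P3, P4, P5, P6, P7⟩ :=
        ih _ _ (fun p hp => hnbrs p (List.mem_cons_of_mem _ hp)) hinv' hcity' hheap' hI4'
      refine ⟨P1, P2, P3, P4, ?_, ?_, ?_⟩
      · intro p hp
        rcases List.mem_cons.1 hp with rfl | hp'
        · obtain ⟨dv', hdv', hle'⟩ := P6 p.1 X hgetv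
          exact ⟨dv', hdv', by rw [← hXs]; omega⟩
        · exact P5 p hp'
      · intro w dw hw
        obtain ⟨dw1, hdw1, hle1⟩ := hmono w dw hw
        obtain ⟨dw2, hdw2, hle2⟩ := P6 w dw1 hdw1
        exact ⟨dw2, hdw2, by omega⟩
      · rcases P7 with ⟨he, _⟩ | hlt
        · exact Or.inr (by rw [he]; exact hmlt)
        · exact Or.inr (pvMLt_trans hlt hmlt)
    · by_cases hltc : X < dvv
      -- CASE 2: improvement: overwrite and push
      · have hred : pvRelaxA t (if city ≠ origin then (1 : Int) else 0) (nb :: rest) (d, h)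
            = pvRelaxA t (if city ≠ origin then (1 : Int) else 0) rest
                (d.insert nb.1 X, h ++ [(X, nb.1)]) := by
          unfold pvRelaxA
          rw [List.foldl_cons]
          simp only [hget, if_pos (hX ▸ hltc)]
          rfl
        rw [hred]
        have hstep := pvRelaxInsert (x := X) hPre hedge hinv hcity (by rw [hXs])
          (Or.inr ⟨dvv, hget, hltc⟩)
        obtain ⟨hinv', hmlt, hmono, hgetv, hx0⟩ := hstep
        have hne : city ≠ nb.1 := by
          intro hcn
          rw [← hcn, hcity] at hget
          injection hget with hget
          have := pvStop_nonneg origin city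
          rw [hXs] at hltc
          omega
        have hcity' : (d.insert nb.1 X).get? city = some t := by
          rw [PySem.Dict.get?_insert_of_ne _ _ hne, hcity]
        have hheap' : pvHeapInv (d.insert nb.1 X) (h ++ [(X, nb.1)]) := by
          intro te hte
          rcases List.mem_append.1 hte with hte | hte
          · obtain ⟨dv, hdv, hle⟩ := hheap te hte
            obtain ⟨dv', hdv', hle'⟩ := hmono te.2 dv hdv
            exact ⟨dv', hdv', by omega⟩
          · simp only [List.mem_singleton] at hte
            subst hte
            exact ⟨X, hgetv, le_refl _⟩
        have hI4' : ∀ u du, (d.insert nb.1 X).get? u = some du →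
            u = city ∨ pvRelaxedAll conns origin (d.insert nb.1 X) u du ∨
              (du, u) ∈ h ++ [(X, nb.1)] := by
          intro u du hu
          by_cases huv : u = nb.1
          · subst huv
            rw [hgetv] at hu
            injection hu with hu
            subst hu
            exact Or.inr (Or.inr (by simp))
          · rw [PySem.Dict.get?_insert_of_ne _ _ huv] at hu
            rcases hI4 u du hu with hh | hh | hh
            · exact Or.inl hh
            · exact Or.inr (Or.inl (pvRelaxedAll_mono hmono hh))
            · exact Or.inr (Or.inr (List.mem_append.2 (Or.inl hh)))
        obtain ⟨P1, P2, P3, P4, P5, P6, P7⟩ :=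
          ih _ _ (fun p hp => hnbrs p (List.mem_cons_of_mem _ hp)) hinv' hcity' hheap' hI4'
        refine ⟨P1, P2, P3, P4, ?_, ?_, ?_⟩
        · intro p hp
          rcases List.mem_cons.1 hp with rfl | hp'
          · obtain ⟨dv', hdv', hle'⟩ := P6 p.1 X hgetv
            exact ⟨dv', hdv', by rw [← hXs]; omega⟩
          · exact P5 p hp'
        · intro w dw hw
          obtain ⟨dw1, hdw1, hle1⟩ := hmono w dw hw
          obtain ⟨dw2, hdw2, hle2⟩ := P6 w dw1 hdw1
          exact ⟨dw2, hdw2, by omega⟩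
        · rcases P7 with ⟨he, _⟩ | hlt
          · exact Or.inr (by rw [he]; exact hmlt)
          · exact Or.inr (pvMLt_trans hlt hmlt)
      -- CASE 3: no improvement: state unchanged
      · have hred : pvRelaxA t (if city ≠ origin then (1 : Int) else 0) (nb :: rest) (d, h)
            = pvRelaxA t (if city ≠ origin then (1 : Int) else 0) rest (d, h) := by
          unfold pvRelaxA
          rw [List.foldl_cons]
          simp only [hget, if_neg (hX ▸ hltc)]
        rw [hred]
        obtain ⟨P1, P2, P3, P4, P5, P6, P7⟩ :=
          ih _ _ (fun p hp => hnbrs p (List.mem_cons_of_mem _ hp)) hinv hcity hheap hI4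
        refine ⟨P1, P2, P3, P4, ?_, P6, P7⟩
        intro p hp
        rcases List.mem_cons.1 hp with rfl | hp'
        · obtain ⟨dv', hdv', hle'⟩ := P6 p.1 dvv hget
          refine ⟨dv', hdv', ?_⟩
          rw [hXs] at hltc
          omega
        · exact P5 p hp'

def pvLoopInvA (conns : List (String × String × Int)) (origin : String)
    (d : PySem.Dict String Int) (h : List (Int × String)) : Prop :=
  pvInvBase conns origin d ∧ pvHeapInv d h ∧
  (∀ u du, d.get? u = some du → pvRelaxedAll conns origin d u du ∨ (du, u) ∈ h)

lemma pvLexLt3_true {verts : List String} {d' d : PySem.Dict String Int} {n' n : Nat}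
    (h : pvMLt verts d' d ∨ (pvMissing verts d' = pvMissing verts d ∧ pvPot d' = pvPot d ∧ n' < n)) :
    pvLexLt3 (pvMissing verts d', pvPot d', n') (pvMissing verts d, pvPot d, n) = true := by
  unfold pvLexLt3
  rcases h with (h | ⟨h1, h2⟩) | ⟨h1, h2, h3⟩ <;> simp_all

lemma pvLoopA_good {conns : List (String × String × Int)} {origin : String}
    (hPre : ∀ e ∈ conns, 0 ≤ e.2.2) :
    ∀ (d : PySem.Dict String Int) (h : List (Int × String)), pvLoopInvA conns origin d h →
      pvGood conns origin (pvLoopA (pvVerts conns origin) (pvBuildGraph conns) origin d h) := by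
  intro d h
  induction d, h using pvLoopA.induct (pvVerts conns origin) (pvBuildGraph conns) origin with
  | case1 dist =>
    intro hinv
    obtain ⟨⟨hC1, hC2, hC3, hC4⟩, hheap, hI4⟩ := hinv
    rw [pvLoopA]
    refine ⟨hC1, hC2, ?_, hC4⟩
    intro u du v c hu hedge
    rcases hI4 u du hu with hh | hh
    · exact hh v c hedge
    · simp at hh
  | case2 dist x rest m heap' cont hcont ih =>
    intro hinv
    obtain ⟨hinv0, hheap, hI4⟩ := hinv
    have hm : pvHeapMin x rest ∈ x :: rest := pvHeapMin_mem x rest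
    obtain ⟨dc, hdc, hdcle⟩ := hheap _ hm
    have hh' : (match dist.get? (pvHeapMin x rest).2 with
        | none => false
        | some d => decide ((pvHeapMin x rest).1 > d)) = true := hcont
    rw [hdc] at hh'
    simp only [decide_eq_true_eq] at hh'
    rw [pvLoopA]
    simp only [hdc, decide_eq_true_eq]
    rw [if_pos hh']
    apply ih
    refine ⟨hinv0, fun te hte => hheap te (List.mem_of_mem_erase hte), ?_⟩
    intro u du hu
    rcases hI4 u du hu with hr | hr
    · exact Or.inl hr
    · right
      have hne : (du, u) ≠ pvHeapMin x rest := by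
        intro he
        have h2 : u = (pvHeapMin x rest).2 := congrArg Prod.snd he
        have h1 : du = (pvHeapMin x rest).1 := congrArg Prod.fst he
        rw [h2, hdc] at hu
        injection hu with hu
        omega
      exact (List.mem_erase_of_ne hne).2 hr
  | case3 dist x rest m heap' cont hcont stopover dist2 heap2 heq hguard ih =>
    intro hinv
    obtain ⟨hinv0, hheap, hI4⟩ := hinv
    have hm : pvHeapMin x rest ∈ x :: rest := pvHeapMin_mem x rest
    obtain ⟨dc, hdc, hdcle⟩ := hheap _ hm
    have hh' : ¬ ((match dist.get? (pvHeapMin x rest).2 with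
        | none => false
        | some d => decide ((pvHeapMin x rest).1 > d)) = true) := hcont
    rw [hdc] at hh'
    simp only [decide_eq_true_eq] at hh'
    have hdceq : dc = (pvHeapMin x rest).1 := by omega
    subst hdceq
    have hnbrs : ∀ p ∈ (pvBuildGraph conns).getD (pvHeapMin x rest).2 [],
        pvIsEdge conns (pvHeapMin x rest).2 p.1 p.2 := by
      intro p hp
      rcases p with ⟨pv, pc⟩
      exact pvMem_graph_iff.1 hp
    have hheap' : pvHeapInv dist ((x :: rest).erase (pvHeapMin x rest)) :=
      fun te hte => hheap te (List.mem_of_mem_erase hte)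
    have hI4' : ∀ u du, dist.get? u = some du → u = (pvHeapMin x rest).2 ∨
        pvRelaxedAll conns origin dist u du ∨ (du, u) ∈ (x :: rest).erase (pvHeapMin x rest) := by
      intro u du hu
      rcases hI4 u du hu with hr | hr
      · exact Or.inr (Or.inl hr)
      · by_cases hum : u = (pvHeapMin x rest).2
        · exact Or.inl hum
        · refine Or.inr (Or.inr ((List.mem_erase_of_ne ?_).2 hr))
          intro he
          exact hum (congrArg Prod.snd he)
    have hpost := pvRelaxA_fold hPre ((pvBuildGraph conns).getD (pvHeapMin x rest).2 [])
      dist ((x :: rest).erase (pvHeapMin x rest)) hnbrs hinv0 hdc hheap' hI4'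
    have heq' : pvRelaxA (pvHeapMin x rest).1
        (if (pvHeapMin x rest).2 ≠ origin then 1 else 0)
        ((pvBuildGraph conns).getD (pvHeapMin x rest).2 [])
        (dist, (x :: rest).erase (pvHeapMin x rest)) = (dist2, heap2) := heq
    rw [heq'] at hpost
    obtain ⟨P1, P2, P3, P4, P5, P6, P7⟩ := hpost
    rw [pvLoopA]
    simp only [hdc, decide_eq_true_eq]
    rw [if_neg (lt_irrefl _), heq']
    rw [if_pos hguard]
    apply ih
    refine ⟨P1, P3, ?_⟩
    intro u du hu
    rcases P4 u du hu with hr | hr | hr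
    · subst hr
      rw [P2] at hu
      injection hu with hu
      subst hu
      left
      intro v c hedge
      obtain ⟨dv, hdv, hle⟩ := P5 (v, c) (pvMem_graph_iff.2 hedge)
      exact ⟨dv, hdv, hle⟩
    · exact Or.inl hr
    · exact Or.inr hr
  | case4 dist x rest m heap' cont hcont stopover dist2 heap2 heq hguard =>
    intro hinv
    obtain ⟨hinv0, hheap, hI4⟩ := hinv
    have hm : pvHeapMin x rest ∈ x :: rest := pvHeapMin_mem x rest
    obtain ⟨dc, hdc, hdcle⟩ := hheap _ hm
    have hh' : ¬ ((match dist.get? (pvHeapMin x rest).2 with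
        | none => false
        | some d => decide ((pvHeapMin x rest).1 > d)) = true) := hcont
    rw [hdc] at hh'
    simp only [decide_eq_true_eq] at hh'
    have hdceq : dc = (pvHeapMin x rest).1 := by omega
    subst hdceq
    have hnbrs : ∀ p ∈ (pvBuildGraph conns).getD (pvHeapMin x rest).2 [],
        pvIsEdge conns (pvHeapMin x rest).2 p.1 p.2 := by
      intro p hp
      rcases p with ⟨pv, pc⟩
      exact pvMem_graph_iff.1 hp
    have hheap' : pvHeapInv dist ((x :: rest).erase (pvHeapMin x rest)) :=
      fun te hte => hheap te (List.mem_of_mem_erase hte)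
    have hI4' : ∀ u du, dist.get? u = some du → u = (pvHeapMin x rest).2 ∨
        pvRelaxedAll conns origin dist u du ∨ (du, u) ∈ (x :: rest).erase (pvHeapMin x rest) := by
      intro u du hu
      rcases hI4 u du hu with hr | hr
      · exact Or.inr (Or.inl hr)
      · by_cases hum : u = (pvHeapMin x rest).2
        · exact Or.inl hum
        · refine Or.inr (Or.inr ((List.mem_erase_of_ne ?_).2 hr))
          intro he
          exact hum (congrArg Prod.snd he)
    have hpost := pvRelaxA_fold hPre ((pvBuildGraph conns).getD (pvHeapMin x rest).2 [])
      dist ((x :: rest).erase (pvHeapMin x rest)) hnbrs hinv0 hdc hheap' hI4'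
    have heq' : pvRelaxA (pvHeapMin x rest).1
        (if (pvHeapMin x rest).2 ≠ origin then 1 else 0)
        ((pvBuildGraph conns).getD (pvHeapMin x rest).2 [])
        (dist, (x :: rest).erase (pvHeapMin x rest)) = (dist2, heap2) := heq
    rw [heq'] at hpost
    obtain ⟨P1, P2, P3, P4, P5, P6, P7⟩ := hpost
    exfalso
    apply hguard
    apply pvLexLt3_true
    rcases P7 with ⟨he1, he2⟩ | hmlt
    · right
      have he1' : dist2 = dist := he1
      have he2' : heap2 = (x :: rest).erase (pvHeapMin x rest) := he2
      refine ⟨by rw [he1'], by rw [he1'], ?_⟩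
      rw [he2']
      have := List.length_pos_of_mem hm
      rw [List.length_erase_of_mem hm]
      omega
    · exact Or.inl hmlt

-- ---- B side: one sweep over the edge list ----
lemma pvStopB_eq (origin u : String) :
    (if (u == origin) then (0 : Int) else 1) = pvStop origin u := by
  unfold pvStop
  by_cases h : u = origin <;> simp [h]

def pvPostB (conns : List (String × String × Int)) (origin : String)
    (edges' : List (String × String × Int)) (d0 : PySem.Dict String Int) (b0 : Bool)
    (st : PySem.Dict String Int × Bool) : Prop :=
  pvInvBase conns origin st.1 ∧
  (st.2 = false → st.1 = d0 ∧ b0 = false ∧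
    (∀ e ∈ edges', ∀ du, d0.get? e.1 = some du →
      ∃ dv, d0.get? e.2.1 = some dv ∧ dv ≤ du + pvStop origin e.1 + e.2.2)) ∧
  ((st.1 = d0 ∧ st.2 = b0) ∨ pvMLt (pvVerts conns origin) st.1 d0)

def pvStepB (origin : String) (st : PySem.Dict String Int × Bool)
    (e : String × String × Int) : PySem.Dict String Int × Bool :=
  match st.1.get? e.1 with
  | none => st
  | some du =>
    let nd := du + (if e.1 == origin then 0 else 1) + e.2.2
    match st.1.get? e.2.1 with
    | none => (st.1.insert e.2.1 nd, true)
    | some dv => if nd < dv then (st.1.insert e.2.1 nd, true) else st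

lemma pvPassB_cons (origin : String) (e : String × String × Int)
    (rest : List (String × String × Int)) (st : PySem.Dict String Int × Bool) :
    pvPassB origin (e :: rest) st = pvPassB origin rest (pvStepB origin st e) := rfl

lemma pvPassB_fold {conns : List (String × String × Int)} {origin : String}
    (hPre : ∀ e ∈ conns, 0 ≤ e.2.2) :
    ∀ (edges' : List (String × String × Int)) (d : PySem.Dict String Int) (b : Bool),
    (∀ e ∈ edges', pvIsEdge conns e.1 e.2.1 e.2.2) →
    pvInvBase conns origin d →
    pvPostB conns origin edges' d b (pvPassB origin edges' (d, b)) := by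
  intro edges'
  induction edges' with
  | nil =>
    intro d b _ hinv
    exact ⟨hinv, fun hf => ⟨rfl, by simpa using hf, by simp⟩, Or.inl ⟨rfl, rfl⟩⟩
  | cons e rest ih =>
    intro d b hedges hinv
    have hedge : pvIsEdge conns e.1 e.2.1 e.2.2 := hedges e List.mem_cons_self
    have hc0 : 0 ≤ e.2.2 := pvIsEdge_nonneg hPre hedge
    rw [pvPassB_cons]
    rcases hu : d.get? e.1 with _ | du
    -- source absent: no-op
    · have hred : pvStepB origin (d, b) e = (d, b) := by
        simp only [pvStepB, hu]
      rw [hred]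
      obtain ⟨P1, P2, P3⟩ := ih d b (fun e' he' => hedges e' (List.mem_cons_of_mem _ he')) hinv
      refine ⟨P1, ?_, P3⟩
      intro hf
      obtain ⟨Q1, Q2, Q3⟩ := P2 hf
      refine ⟨Q1, Q2, ?_⟩
      intro e' he' du' hdu'
      rcases List.mem_cons.1 he' with rfl | he''
      · rw [hu] at hdu'; simp at hdu'
      · exact Q3 e' he'' du' hdu'
    · set X : Int := du + (if (e.1 == origin) then (0 : Int) else 1) + e.2.2 with hX
      have hXs : X = du + pvStop origin e.1 + e.2.2 := by rw [hX, pvStopB_eq]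
      rcases hv : d.get? e.2.1 with _ | dv
      -- target absent: insert, changed := true
      · have hred : pvStepB origin (d, b) e = (d.insert e.2.1 X, true) := by
          simp only [pvStepB, hu, hv]
          rw [hX]
        rw [hred]
        have hstep := pvRelaxInsert (x := X) hPre hedge hinv hu hXs (Or.inl hv)
        obtain ⟨hinv', hmlt, hmono, hgetv, hx0⟩ := hstep
        obtain ⟨P1, P2, P3⟩ := ih (d.insert e.2.1 X) true
          (fun e' he' => hedges e' (List.mem_cons_of_mem _ he')) hinv'
        refine ⟨P1, ?_, ?_⟩
        · intro hf
          obtain ⟨_, Q2, _⟩ := P2 hf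
          exact absurd Q2 (by simp)
        · rcases P3 with ⟨he1, _⟩ | hmlt2
          · exact Or.inr (by rw [he1]; exact hmlt)
          · exact Or.inr (pvMLt_trans hmlt2 hmlt)
      · by_cases hlt : X < dv
        -- improvement: overwrite, changed := true
        · have hred : pvStepB origin (d, b) e = (d.insert e.2.1 X, true) := by
            simp only [pvStepB, hu, hv, if_pos (hX ▸ hlt)]
            rw [hX]
          rw [hred]
          have hstep := pvRelaxInsert (x := X) hPre hedge hinv hu hXs (Or.inr ⟨dv, hv, hlt⟩)
          obtain ⟨hinv', hmlt, hmono, hgetv, hx0⟩ := hstep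
          obtain ⟨P1, P2, P3⟩ := ih (d.insert e.2.1 X) true
            (fun e' he' => hedges e' (List.mem_cons_of_mem _ he')) hinv'
          refine ⟨P1, ?_, ?_⟩
          · intro hf
            obtain ⟨_, Q2, _⟩ := P2 hf
            exact absurd Q2 (by simp)
          · rcases P3 with ⟨he1, _⟩ | hmlt2
            · exact Or.inr (by rw [he1]; exact hmlt)
            · exact Or.inr (pvMLt_trans hmlt2 hmlt)
        -- already relaxed: no-op
        · have hred : pvStepB origin (d, b) e = (d, b) := by
            simp only [pvStepB, hu, hv, if_neg (hX ▸ hlt)]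
          rw [hred]
          obtain ⟨P1, P2, P3⟩ := ih d b (fun e' he' => hedges e' (List.mem_cons_of_mem _ he')) hinv
          refine ⟨P1, ?_, P3⟩
          intro hf
          obtain ⟨Q1, Q2, Q3⟩ := P2 hf
          refine ⟨Q1, Q2, ?_⟩
          intro e' he' du' hdu'
          rcases List.mem_cons.1 he' with rfl | he''
          · rw [hu] at hdu'
            injection hdu' with hdu'
            subst hdu'
            exact ⟨dv, hv, by rw [← hXs]; omega⟩
          · exact Q3 e' he'' du' hdu'

lemma pvLexLt2_true {verts : List String} {d' d : PySem.Dict String Int}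
    (h : pvMLt verts d' d) :
    pvLexLt2 (pvMissing verts d', pvPot d') (pvMissing verts d, pvPot d) = true := by
  unfold pvLexLt2
  rcases h with h | ⟨h1, h2⟩ <;> simp_all

lemma pvLoopB_good {conns : List (String × String × Int)} {origin : String}
    (hPre : ∀ e ∈ conns, 0 ≤ e.2.2) :
    ∀ (d : PySem.Dict String Int), pvInvBase conns origin d →
      pvGood conns origin (pvLoopB (pvVerts conns origin) origin (pvEdges conns) d) := by
  have hedges : ∀ e ∈ pvEdges conns, pvIsEdge conns e.1 e.2.1 e.2.2 :=
    fun e he => pvMem_edges he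
  intro d
  induction d using pvLoopB.induct (pvVerts conns origin) origin (pvEdges conns) with
  | case1 dist st hst hguard ih =>
    intro hinv
    obtain ⟨P1, P2, P3⟩ := pvPassB_fold hPre (pvEdges conns) dist false hedges hinv
    rw [pvLoopB]
    have hst1 : (pvPassB origin (pvEdges conns) (dist, false)).2 = true := hst
    have hg1 : pvLexLt2
        (pvMissing (pvVerts conns origin) (pvPassB origin (pvEdges conns) (dist, false)).1,
          pvPot (pvPassB origin (pvEdges conns) (dist, false)).1)
        (pvMissing (pvVerts conns origin) dist, pvPot dist) = true := hguard
    rw [if_pos hst1, if_pos hg1]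
    exact ih P1
  | case2 dist st hst hguard =>
    intro hinv
    obtain ⟨P1, P2, P3⟩ := pvPassB_fold hPre (pvEdges conns) dist false hedges hinv
    exfalso
    apply hguard
    apply pvLexLt2_true
    rcases P3 with ⟨he1, he2⟩ | hmlt
    · rw [he2] at hst; simp at hst
    · exact hmlt
  | case3 dist st hst =>
    intro hinv
    obtain ⟨P1, P2, P3⟩ := pvPassB_fold hPre (pvEdges conns) dist false hedges hinv
    have hst' : (pvPassB origin (pvEdges conns) (dist, false)).2 = false := by
      simpa using hst
    obtain ⟨Q1, _, Q3⟩ := P2 hst'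
    rw [pvLoopB]
    rw [if_neg (by rw [hst']; simp)]
    rw [Q1]
    obtain ⟨hC1, hC2, hC3, hC4⟩ := hinv
    refine ⟨hC1, hC2, ?_, hC4⟩
    intro u du v c hu hedge
    obtain ⟨dv, hdv, hle⟩ := Q3 (u, v, c) (pvEdges_of_isEdge hedge) du hu
    exact ⟨dv, hdv, hle⟩

-- ---- uniqueness of the characterization, and the final count ----
lemma pvGood_le {conns : List (String × String × Int)} {origin : String}
    {D1 D2 : PySem.Dict String Int}
    (h1 : pvGood conns origin D1) (h2 : pvGood conns origin D2) :
    ∀ v d1, D1.get? v = some d1 → ∃ d2, D2.get? v = some d2 ∧ d2 ≤ d1 := by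
  intro v d1 hv
  set f : String → WithTop ℤ :=
    fun w => (D2.get? w).elim ⊤ (fun n => ((n : ℤ) : WithTop ℤ)) with hf
  have hfeas : pvFeasible conns origin f := by
    constructor
    · rw [hf]; simp [h2.1]
    · intro u w c hedge
      rcases hu : D2.get? u with _ | du
      · simp [hf, hu]
      · obtain ⟨dv, hdv, hle⟩ := h2.2.2.1 u du w c hu hedge
        simp only [hf, hu, hdv, Option.elim]
        rw [← WithTop.coe_add]
        exact WithTop.coe_le_coe.2 (by omega)
  have hmin := h1.2.2.2 f hfeas v d1 hv
  rcases hv2 : D2.get? v with _ | d2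
  · rw [hf] at hmin
    simp [hv2] at hmin
  · refine ⟨d2, rfl, ?_⟩
    rw [hf] at hmin
    simp only [hv2, Option.elim] at hmin
    exact_mod_cast hmin

lemma pvGood_unique {conns : List (String × String × Int)} {origin : String}
    {D1 D2 : PySem.Dict String Int}
    (h1 : pvGood conns origin D1) (h2 : pvGood conns origin D2) :
    ∀ v, D1.get? v = D2.get? v := by
  intro v
  rcases hv1 : D1.get? v with _ | d1 <;> rcases hv2 : D2.get? v with _ | d2
  · rfl
  · obtain ⟨d1', hd1', _⟩ := pvGood_le h2 h1 v d2 hv2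
    rw [hv1] at hd1'; simp at hd1'
  · obtain ⟨d2', hd2', _⟩ := pvGood_le h1 h2 v d1 hv1
    rw [hv2] at hd2'; simp at hd2'
  · obtain ⟨d2', hd2', hle2⟩ := pvGood_le h1 h2 v d1 hv1
    obtain ⟨d1', hd1', hle1⟩ := pvGood_le h2 h1 v d2 hv2
    rw [hv2] at hd2'
    rw [hv1] at hd1'
    injection hd2' with hd2'
    injection hd1' with hd1'
    subst hd2'
    subst hd1'
    congr 1
    omega

lemma pvCount_foldl (origin : String) (k : Int) (l : List (String × Int)) (acc : Int) :
    l.foldl (fun acc p => if p.1 ≠ origin ∧ p.2 ≤ k then acc + 1 else acc) acc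
      = acc + (l.countP (fun p => decide (p.1 ≠ origin ∧ p.2 ≤ k)) : Int) := by
  induction l generalizing acc with
  | nil => simp
  | cons p ps ih =>
    rw [List.foldl_cons, List.countP_cons, ih]
    by_cases hp : p.1 ≠ origin ∧ p.2 ≤ k
    · simp only [if_pos hp, decide_eq_true hp]
      push_cast
      omega
    · simp only [if_neg hp, decide_eq_false hp]
      push_cast
      omega

lemma pvCount_congr {D1 D2 : PySem.Dict String Int} (origin : String) (k : Int)
    (n1 : D1.keys.Nodup) (n2 : D2.keys.Nodup) (h : ∀ v, D1.get? v = D2.get? v) :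
    pvCount origin k D1 = pvCount origin k D2 := by
  unfold pvCount
  rw [pvCount_foldl, pvCount_foldl]
  have hperm : D1.items.Perm D2.items := by
    refine (List.perm_ext_iff_of_nodup ?_ ?_).2 ?_
    · exact List.Nodup.of_map _ n1
    · exact List.Nodup.of_map _ n2
    · rintro ⟨pk, pv⟩
      rw [← PySem.Dict.get?_eq_some_iff_mem_items _ _ _ n1,
        ← PySem.Dict.get?_eq_some_iff_mem_items _ _ _ n2, h pk]
  rw [hperm.countP_eq]

-- ---- initial states ----
lemma pvInit_base (conns : List (String × String × Int)) (origin : String) :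
    pvInvBase conns origin (PySem.Dict.empty.insert origin 0) := by
  refine ⟨PySem.Dict.get?_insert_self _ _ _, ?_, ?_, ?_⟩
  · exact PySem.Dict.nodup_keys_insert _ _ _ (by simp [PySem.Dict.keys_empty])
  · intro v dv h
    rw [PySem.Dict.get?_insert] at h
    split at h
    · injection h with h; omega
    · rw [PySem.Dict.get?_empty] at h; simp at h
  · intro f hf v dv h
    rw [PySem.Dict.get?_insert] at h
    split at h
    · rename_i hv
      subst hv
      injection h with h
      subst h
      simpa using hf.1
    · rw [PySem.Dict.get?_empty] at h; simp at h

lemma pvInitA (conns : List (String × String × Int)) (origin : String) :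
    pvLoopInvA conns origin (PySem.Dict.empty.insert origin 0) [(0, origin)] := by
  refine ⟨pvInit_base conns origin, ?_, ?_⟩
  · intro te hte
    simp only [List.mem_singleton] at hte
    subst hte
    exact ⟨0, PySem.Dict.get?_insert_self _ _ _, le_refl _⟩
  · intro u du h
    rw [PySem.Dict.get?_insert] at h
    split at h
    · rename_i hv
      subst hv
      injection h with h
      subst h
      exact Or.inr (by simp)
    · rw [PySem.Dict.get?_empty] at h; simp at h

-- ===== VERDICT (by name: the statement is the Claim_ definition above) =====
theorem vacationDestinations_spec : Claim_equal_vacationDestinations := by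
  unfold Claim_equal_vacationDestinations
  intro connections origin k _ hPre
  unfold Spec_vacationDestinations vacationDestinations vacationDestinations_alt
  have hA := pvLoopA_good (conns := connections) (origin := origin) hPre _ _
    (pvInitA connections origin)
  have hB := pvLoopB_good (conns := connections) (origin := origin) hPre _
    (pvInit_base connections origin)
  exact pvCount_congr origin k hA.2.1 hB.2.1 (pvGood_unique hA hB)
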